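-- pv_equiv track=rewrite | github.com/dreamingdoll/jo | 시험대비문제( COS_PRO )/모의고사2/문제10.py | solution
-- ===== SOURCE A (Python) =====
-- def solution(time_table, n):
--     answer = [0 for _ in range(n)]
--     count = 0
--     for i in range(len(time_table)):
--         answer[count] += time_table[i]
--         count  += 1
--         if count >= n:
--             count = 0
--     return max(answer)
-- ===== SOURCE B (Python) =====
-- def solution(time_table, n):
--     answer = [sum(time_table[i] for i in range(j, len(time_table), n)) for j in range(n)]
--     return max(answer)
-- ===== Notes on version B (the rewrite author's own statement) =====
-- stated objective: alternative
-- what changed: The single interleaved scatter pass with a rotating bucket counter is replaced by n independent strided gather sums (bucket j = sum of elements at indices j, j+n, ...), then max.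
import Mathlib
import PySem

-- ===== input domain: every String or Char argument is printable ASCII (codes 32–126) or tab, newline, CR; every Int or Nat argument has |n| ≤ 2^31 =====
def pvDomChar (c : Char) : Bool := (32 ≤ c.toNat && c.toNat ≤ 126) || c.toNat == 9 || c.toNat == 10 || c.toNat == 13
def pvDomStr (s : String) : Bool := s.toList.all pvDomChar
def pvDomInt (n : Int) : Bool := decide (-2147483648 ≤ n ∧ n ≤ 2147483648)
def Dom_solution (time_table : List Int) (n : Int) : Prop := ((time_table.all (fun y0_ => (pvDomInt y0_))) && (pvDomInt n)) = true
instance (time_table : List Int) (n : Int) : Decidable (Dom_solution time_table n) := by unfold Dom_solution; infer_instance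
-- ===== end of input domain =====

-- B replaces A's single scatter pass (rotating bucket counter) by n independent strided
-- gather sums, one per bucket; same bucket sums, same max. Objective: alternative decomposition.

-- ===== PORT A =====
-- loop body of A: answer[count] += x; count += 1; if count >= n: count = 0
def pvStepA (n : Int) (st : List Int × Int) (x : Int) : List Int × Int :=
  let answer := st.1.set st.2.toNat (PySem.List.pyGetD st.1 st.2 0 + x)
  let count := st.2 + 1
  (answer, if count ≥ n then 0 else count)

def solution (time_table : List Int) (n : Int) : Int :=
  let answer : List Int := (PySem.List.pyRange 0 n 1).map (fun _ => 0)
  let r := (PySem.List.pyRange 0 (time_table.length : Int) 1).foldl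
      (fun st i => pvStepA n st (PySem.List.pyGetD time_table i 0)) (answer, 0)
  (PySem.List.max? r.1 (fun x => x)).getD 0

-- ===== PORT B =====
def solution_alt (time_table : List Int) (n : Int) : Int :=
  let answer : List Int := (PySem.List.pyRange 0 n 1).map
    (fun j => ((PySem.List.pyRange j (time_table.length : Int) n).map
        (fun i => PySem.List.pyGetD time_table i 0)).sum)
  (PySem.List.max? answer (fun x => x)).getD 0

-- ===== PRECONDITION & SPEC =====
-- Pre_ excludes n ≤ 0, where A raises (IndexError on a nonempty list, ValueError from max([]) on []).
def Pre_solution (time_table : List Int) (n : Int) : Prop := 1 ≤ n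
instance (time_table : List Int) (n : Int) : Decidable (Pre_solution time_table n) := by unfold Pre_solution; infer_instance
def pvWitness_solution : List Int × Int := ([1, 2, 3, 4, 5], 2)

def Spec_solution (time_table : List Int) (n : Int) (out : Int) : Prop := out = solution_alt time_table n
instance (time_table : List Int) (n : Int) (out : Int) : Decidable (Spec_solution time_table n out) := by unfold Spec_solution; infer_instance

-- ===== CLAIM (what is proved, stated in full; the proofs are below) =====
def Claim_equal_solution : Prop := ∀ (time_table : List Int) (n : Int), Dom_solution time_table n → Pre_solution time_table n → Spec_solution time_table n (solution time_table n)

-- ===== LEMMAS AND PROOFS =====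

-- sum of elements of l at indices d, d+nn, d+2nn, …
def pvStride (l : List Int) (d : Nat) (nn : Nat) : Int :=
  match l, d with
  | [], _ => 0
  | x :: xs, 0 => x + pvStride xs (nn - 1) nn
  | _ :: xs, d + 1 => pvStride xs d nn

-- offset inside the round-robin cycle: first loop position that hits bucket j when the counter is c
def pvOff (j c nn : Nat) : Nat := if c ≤ j then j - c else j + nn - c

theorem pvPyRange_pos_nil (a b s : Int) (hs : 0 < s) (h : b ≤ a) :
    PySem.List.pyRange a b s = [] := by
  rw [PySem.List.pyRange_of_pos a b hs]
  simp [show ¬ a < b by omega]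

theorem pvPyRange_pos_cons (a b s : Int) (hs : 0 < s) (h : a < b) :
    PySem.List.pyRange a b s = a :: PySem.List.pyRange (a + s) b s := by
  rw [PySem.List.pyRange_of_pos a b hs, PySem.List.pyRange_of_pos (a + s) b hs]
  have key : (b - a + s - 1) / s = (b - a - 1) / s + 1 := by
    have := Int.add_mul_ediv_right (b - a - 1) 1 (by omega : s ≠ 0)
    rw [show b - a + s - 1 = b - a - 1 + 1 * s by ring, this]
  have hcount : ((b - a + s - 1) / s).toNat =
      (if a + s < b then ((b - (a + s) + s - 1) / s).toNat else 0) + 1 := by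
    by_cases hb : a + s < b
    · rw [if_pos hb, key, show b - (a + s) + s - 1 = b - a - 1 by ring]
      have h0 : 0 ≤ (b - a - 1) / s := Int.ediv_nonneg (by omega) (by omega)
      omega
    · rw [if_neg hb, key, show (b - a - 1) / s = 0 from
        Int.ediv_eq_zero_of_lt (by omega) (by omega)]
      norm_num
  rw [if_pos h, hcount, List.range_succ_eq_map, List.map_cons, List.map_map]
  simp only [List.cons.injEq]
  refine ⟨by simp, ?_⟩
  apply List.map_congr_left; intro k _; simp [Function.comp]; ring

theorem pvPyRange_pos_shift (a b s : Int) (hs : 0 < s) :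
    PySem.List.pyRange (a + 1) (b + 1) s = (PySem.List.pyRange a b s).map (· + 1) := by
  rw [PySem.List.pyRange_of_pos a b hs, PySem.List.pyRange_of_pos (a + 1) (b + 1) hs]
  rw [List.map_map]
  simp only [add_lt_add_iff_right, show b + 1 - (a + 1) + s - 1 = b - a + s - 1 by ring]
  apply List.map_congr_left; intros; simp [Function.comp]; ring

theorem pvGatherEq (l : List Int) : ∀ (j nn : Nat), 0 < nn →
    ((PySem.List.pyRange (j : Int) (l.length : Int) (nn : Int)).map
      (fun i => PySem.List.pyGetD l i 0)).sum = pvStride l j nn := by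
  induction l with
  | nil =>
    intro j nn hnn
    rw [pvPyRange_pos_nil _ _ _ (by exact_mod_cast hnn) (by simp)]
    simp [pvStride]
  | cons x xs ih =>
    intro j nn hnn
    have hs : (0 : Int) < (nn : Int) := by exact_mod_cast hnn
    have shift : ∀ (a : Nat) (b : Int), 0 ≤ b →
        ((PySem.List.pyRange ((a : Int) + 1) (b + 1) (nn : Int)).map
          (fun i => PySem.List.pyGetD (x :: xs) i 0)).sum =
        ((PySem.List.pyRange (a : Int) b (nn : Int)).map
          (fun i => PySem.List.pyGetD xs i 0)).sum := by
      intro a b hb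
      rw [pvPyRange_pos_shift _ _ _ hs, List.map_map]
      congr 1
      apply List.map_congr_left
      intro i hi
      have hia : (a : Int) ≤ i := ((PySem.List.mem_pyRange_iff_of_pos hs i).1 hi).1
      have h0 : 0 ≤ i := le_trans (by positivity) hia
      obtain ⟨m, rfl⟩ : ∃ m : Nat, (m : Int) = i := ⟨i.toNat, Int.toNat_of_nonneg h0⟩
      simp only [Function.comp_apply]
      rw [show ((m : Int) + 1) = ((m + 1 : Nat) : Int) by push_cast; ring,
        PySem.List.pyGetD_natCast, PySem.List.pyGetD_natCast]
      simp [List.getD]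
    match j with
    | 0 =>
      simp only [Nat.cast_zero]
      rw [pvPyRange_pos_cons _ _ _ hs (by simp)]
      simp only [List.map_cons, List.sum_cons]
      have h1 : PySem.List.pyGetD (x :: xs) (0 : Int) 0 = x := by
        rw [show (0:Int) = ((0:Nat):Int) by simp, PySem.List.pyGetD_natCast]; simp
      rw [h1]
      have e1 : (0 : Int) + (nn : Int) = ((nn - 1 : Nat) : Int) + 1 := by omega
      have e2 : ((x :: xs).length : Int) = (xs.length : Int) + 1 := by simp
      rw [e1, e2, shift (nn - 1) (xs.length : Int) (by positivity)]
      rw [ih (nn - 1) nn hnn]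
      rfl
    | j + 1 =>
      have e1 : ((j + 1 : Nat) : Int) = ((j : Nat) : Int) + 1 := by norm_cast
      have e2 : ((x :: xs).length : Int) = (xs.length : Int) + 1 := by simp
      rw [e1, e2, shift j (xs.length : Int) (by positivity)]
      exact ih j nn hnn

theorem pvScatterEq (n : Int) (hn : 1 ≤ n) (l : List Int) : ∀ (ans : List Int) (c : Nat),
    ans.length = n.toNat → c < n.toNat →
    (l.foldl (pvStepA n) (ans, (c : Int))).1 =
      (List.range n.toNat).map (fun j => ans.getD j 0 + pvStride l (pvOff j c n.toNat) n.toNat) := by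
  induction l with
  | nil =>
    intro ans c hlen hc
    simp only [List.foldl_nil, pvStride]
    apply List.ext_getElem (by simp [hlen]) _
    intro i h1 h2
    simp only [List.getElem_map, List.getElem_range, add_zero]
    simp at h2
    rw [List.getD_eq_getElem?_getD, List.getElem?_eq_getElem (by omega : i < ans.length)]
    simp
  | cons x xs ih =>
    intro ans c hlen hc
    simp only [List.foldl_cons]
    have hcnat : ((c : Int)).toNat = c := by simp
    have hget : PySem.List.pyGetD ans (c : Int) 0 = ans.getD c 0 := PySem.List.pyGetD_natCast ans c 0
    have hstep : pvStepA n (ans, (c : Int)) x =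
        (ans.set c (ans.getD c 0 + x), ((if c + 1 = n.toNat then 0 else c + 1 : Nat) : Int)) := by
      simp only [pvStepA, hcnat, hget]
      congr 1
      by_cases h : c + 1 = n.toNat
      · rw [if_pos (by omega : (c : Int) + 1 ≥ n), if_pos h]; simp
      · rw [if_neg (by omega : ¬ (c : Int) + 1 ≥ n), if_neg h]; push_cast; ring
    rw [hstep, ih (ans.set c (ans.getD c 0 + x)) (if c + 1 = n.toNat then 0 else c + 1)
      (by simpa using hlen) (by split <;> omega)]
    apply List.map_congr_left
    intro j hj
    simp only [List.mem_range] at hj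
    by_cases hjc : j = c
    · subst hjc
      have hset : (ans.set j (ans.getD j 0 + x)).getD j 0 = ans.getD j 0 + x := by
        simp [List.getD_eq_getElem?_getD, hlen, hj]
      rw [hset]
      have hoff : pvOff j j n.toNat = 0 := by simp [pvOff]
      have hoff' : pvOff j (if j + 1 = n.toNat then 0 else j + 1) n.toNat = n.toNat - 1 := by
        simp only [pvOff]; split_ifs <;> omega
      rw [hoff, hoff']
      show ans.getD j 0 + x + pvStride xs (n.toNat - 1) n.toNat = _
      simp only [pvStride]
      ring
    · have hset : (ans.set c (ans.getD c 0 + x)).getD j 0 = ans.getD j 0 := by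
        simp [List.getD_eq_getElem?_getD, List.getElem?_set_ne (fun h => hjc h.symm)]
      rw [hset]
      obtain ⟨d, h1, h2⟩ : ∃ d : Nat, pvOff j c n.toNat = d + 1 ∧
          pvOff j (if c + 1 = n.toNat then 0 else c + 1) n.toNat = d := by
        refine ⟨pvOff j c n.toNat - 1, ?_, ?_⟩ <;> simp only [pvOff] <;> split_ifs <;> omega
      rw [h1, h2]
      rfl

theorem pvListsEq (time_table : List Int) (n : Int) (hn : 1 ≤ n) :
    ((PySem.List.pyRange 0 (time_table.length : Int) 1).foldl
      (fun st i => pvStepA n st (PySem.List.pyGetD time_table i 0))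
      ((PySem.List.pyRange 0 n 1).map (fun _ => (0:Int)), 0)).1 =
    (PySem.List.pyRange 0 n 1).map
      (fun j => ((PySem.List.pyRange j (time_table.length : Int) n).map
        (fun i => PySem.List.pyGetD time_table i 0)).sum) := by
  rw [PySem.List.foldl_pyRange_zero_pyGetD' time_table 0 (pvStepA n)
      ((PySem.List.pyRange 0 n 1).map (fun _ => (0:Int)), 0)]
  have hlen : ((PySem.List.pyRange 0 n 1).map (fun _ => (0:Int))).length = n.toNat := by
    simp [PySem.List.pyRange_zero]
  have hsc := pvScatterEq n hn time_table
      ((PySem.List.pyRange 0 n 1).map (fun _ => (0:Int))) 0 hlen (by omega)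
  simp only [Nat.cast_zero] at hsc
  rw [hsc, PySem.List.pyRange_zero, List.map_map, List.map_map]
  apply List.map_congr_left
  intro j hj
  simp only [List.mem_range] at hj
  simp only [Function.comp_apply]
  rw [show pvOff j 0 n.toNat = j by simp [pvOff]]
  rw [List.getD_eq_getElem?_getD, List.getElem?_map, List.getElem?_range hj]
  simp only [Option.map_some, Option.getD_some, Function.comp_apply, zero_add]
  have hg := pvGatherEq time_table j n.toNat (by omega)
  rw [show ((n.toNat : Nat) : Int) = n by omega] at hg
  exact hg.symm

-- ===== VERDICT (by name: the statement is the Claim_ definition above) =====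
theorem solution_spec : Claim_equal_solution := by
  intro time_table n _ hpre
  unfold Spec_solution solution solution_alt
  simp only []
  rw [pvListsEq time_table n hpre]
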